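-- pv_equiv track=rewrite | github.com/AstredStar/Miscelanous-and-practices | 2021_first_excercises/A3-game of life/coin_utils.py | is_base202
-- ===== SOURCE A (Python) =====
-- BASE202_CHARS='0C2OMPIN'
--
-- def is_base202(string):     # exception handling for this function is done in get_all_coins
--     '''
--     (str)->bool
--     checks if a str is a valid base202 number
--     >>> is_base202('20')
--     False
--     >>> is_base202('0c00000000')
--     True
--     >>> is_base202('0c00000c0')
--     False
--     '''
--     string=string.upper()
--     if string[:2]!='0C' or len(string)!=10:
--         return False
--     for char in string:
--         if char not in BASE202_CHARS:
--             return False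
--     return True
-- ===== SOURCE B (Python) =====
-- BASE202_CHARS = '0C2OMPIN'
--
-- def is_base202(string):
--     # Single-pass deterministic finite automaton for the language 0C[0C2OMPIN]{8}:
--     # states 0..10 (10 = accept), -1 = dead; no separate length/prefix checks.
--     state = 0
--     for char in string.upper():
--         if state == 0:
--             state = 1 if char == '0' else -1
--         elif state == 1:
--             state = 2 if char == 'C' else -1
--         elif 2 <= state <= 9:
--             state = state + 1 if char in BASE202_CHARS else -1
--         else:
--             state = -1
--     return state == 10
-- ===== Notes on version B (the rewrite author's own statement) =====
-- stated objective: alternative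
-- what changed: Replaces A's slice/length guards plus per-character membership loop with a single-pass 12-state deterministic finite automaton (the DFA of the regex 0C[0C2OMPIN]{8}) folded over the string, accepting iff the final state is the accept state.
import Mathlib
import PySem

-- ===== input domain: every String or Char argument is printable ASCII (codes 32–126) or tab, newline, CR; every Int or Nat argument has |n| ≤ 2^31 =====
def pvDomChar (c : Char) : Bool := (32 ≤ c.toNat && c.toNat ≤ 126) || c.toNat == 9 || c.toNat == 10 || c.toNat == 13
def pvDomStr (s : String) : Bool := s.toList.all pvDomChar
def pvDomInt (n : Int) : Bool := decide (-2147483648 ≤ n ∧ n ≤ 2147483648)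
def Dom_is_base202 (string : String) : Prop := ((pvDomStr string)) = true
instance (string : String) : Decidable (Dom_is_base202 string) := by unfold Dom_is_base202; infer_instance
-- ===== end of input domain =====

-- B replaces A's slice/length guards plus per-character membership loop with a
-- single-pass deterministic finite automaton (states 0..10, dead state -1); objective: alternative.


-- ===== PORT A =====
-- the 'for char in string: if char not in BASE202_CHARS: return False' loop
def pvLoopA : List Char → Bool
  | [] => true
  | c :: rest => if !(PySem.Chars.isIn [c] "0C2OMPIN".toList) then false else pvLoopA rest

def is_base202 (string : String) : Bool :=
  let u := PySem.Str.upper string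
  if PySem.Str.slice u none (some 2) != "0C" || PySem.Str.len u != 10 then false
  else pvLoopA u.toList

-- ===== PORT B =====
-- one DFA transition of Source B's loop body; 'char in BASE202_CHARS' on a single
-- character is exactly list membership, ported as List.contains
def pvDfaStep (state : Int) (char : Char) : Int :=
  if state == 0 then (if char == '0' then 1 else -1)
  else if state == 1 then (if char == 'C' then 2 else -1)
  else if 2 ≤ state && state ≤ 9 then
    (if ("0C2OMPIN".toList).contains char then state + 1 else -1)
  else -1

def is_base202_alt (string : String) : Bool :=
  (PySem.Str.upper string).toList.foldl pvDfaStep 0 == 10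

-- ===== PRECONDITION & SPEC =====
def Spec_is_base202 (string : String) (out : Bool) : Prop := out = is_base202_alt string
instance (string : String) (out : Bool) : Decidable (Spec_is_base202 string out) := by unfold Spec_is_base202; infer_instance

-- ===== CLAIM (what is proved, stated in full; the proofs are below) =====
def Claim_equal_is_base202 : Prop := ∀ (string : String), Dom_is_base202 string → Spec_is_base202 string (is_base202 string)

-- ===== LEMMAS AND PROOFS =====

-- A's character loop is charset membership of every character
theorem pvLoopA_eq_all (l : List Char) :
    pvLoopA l = l.all (fun c => ("0C2OMPIN".toList).contains c) := by
  induction l with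
  | nil => rfl
  | cons c rest ih =>
      rw [List.all_cons, ← ih]
      show (if !(PySem.Chars.isIn [c] "0C2OMPIN".toList) then false else pvLoopA rest) = _
      by_cases h : c ∈ "0C2OMPIN".toList
      · have h1 : PySem.Chars.isIn [c] "0C2OMPIN".toList = true := by
          rw [PySem.Chars.isIn_iff_infix]
          obtain ⟨s, t, hst⟩ := List.append_of_mem h
          exact ⟨s, t, by simp [hst]⟩
        have h2 : ("0C2OMPIN".toList).contains c = true := by
          simpa [List.contains_eq_mem] using h
        rw [h1, h2]; simp
      · have h1 : PySem.Chars.isIn [c] "0C2OMPIN".toList = false := by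
          cases hb : PySem.Chars.isIn [c] "0C2OMPIN".toList
          · rfl
          · rw [PySem.Chars.isIn_iff_infix] at hb
            exact absurd (hb.mem (by simp)) h
        have h2 : ("0C2OMPIN".toList).contains c = false := by
          simpa [List.contains_eq_mem] using h
        rw [h1, h2]; simp

-- A's prefix test u[:2] == '0C' is startswith
theorem pv_sw (u : String) :
    PySem.Str.startswith u "0C" = (PySem.Str.slice u none (some 2) == "0C") := by
  have hsl : (PySem.Str.slice u none (some 2)).toList = u.toList.take 2 := by
    rw [PySem.Str.toList_slice, PySem.Chars.slice_eq_listSlice,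
        show ((2:Int)) = ((2:Nat):Int) from rfl, PySem.List.slice_to_natCast]
  rw [PySem.Str.startswith_eq]
  cases hb : PySem.Chars.startswith u.toList "0C".toList with
  | false =>
    symm; rw [beq_eq_false_iff_ne]
    intro he
    have h2 : u.toList.take 2 = "0C".toList := by rw [← hsl, he]
    have hpre : "0C".toList <+: u.toList :=
      ⟨u.toList.drop 2, by rw [← h2]; exact List.take_append_drop 2 u.toList⟩
    have htrue := (PySem.Chars.startswith_iff u.toList "0C".toList).mpr hpre
    rw [hb] at htrue
    exact Bool.false_ne_true htrue
  | true =>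
    symm; rw [beq_iff_eq]
    have hpre := (PySem.Chars.startswith_iff u.toList "0C".toList).mp hb
    have h2 : u.toList.take 2 = "0C".toList := by
      have := List.prefix_iff_eq_take.mp hpre
      simpa using this.symm
    exact String.toList_injective (by rw [hsl, h2])

-- the dead state absorbs
theorem pvDfa_dead (l : List Char) : l.foldl pvDfaStep (-1) = -1 := by
  induction l with
  | nil => rfl
  | cons c rest ih => simpa [List.foldl_cons, pvDfaStep] using ih

-- from state 2+k (k ≤ 8) the DFA accepts iff exactly 8-k charset characters remain
theorem pvDfa_mid (l : List Char) : ∀ (k : Nat), k ≤ 8 →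
    ((l.foldl pvDfaStep (2 + (k : Int)) = 10) ↔
      (l.length = 8 - k ∧ l.all (fun c => ("0C2OMPIN".toList).contains c) = true)) := by
  induction l with
  | nil =>
      intro k hk
      simp only [List.foldl_nil, List.length_nil, List.all_nil]
      constructor
      · intro h
        exact ⟨by omega, by simp⟩
      · rintro ⟨h, -⟩
        omega
  | cons c rest ih =>
      intro k hk
      rw [List.foldl_cons]
      by_cases hk8 : k = 8
      · -- state is already the accept state 10: any character kills the run
        subst hk8
        have hstep : pvDfaStep (2 + ((8 : Nat) : Int)) c = -1 := by
          unfold pvDfaStep; norm_num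
        rw [hstep, pvDfa_dead]
        simp
      · have hstep : pvDfaStep (2 + (k : Int)) c =
            (if ("0C2OMPIN".toList).contains c then 2 + (k : Int) + 1 else -1) := by
          have h0 : ¬ ((2 + (k : Int) == 0) = true) := by simp; omega
          have h1 : ¬ ((2 + (k : Int) == 1) = true) := by simp; omega
          have h2 : (decide (2 ≤ 2 + (k : Int)) && decide (2 + (k : Int) ≤ 9)) = true := by
            simp; omega
          unfold pvDfaStep
          rw [if_neg h0, if_neg h1, if_pos h2]
        by_cases hc : ("0C2OMPIN".toList).contains c = true
        · rw [hstep, if_pos hc,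
              show (2 + (k : Int) + 1) = 2 + ((k + 1 : Nat) : Int) by push_cast; ring,
              ih (k + 1) (by omega)]
          simp only [List.length_cons, List.all_cons, hc, Bool.true_and]
          constructor
          · rintro ⟨h1, h2⟩; exact ⟨by omega, h2⟩
          · rintro ⟨h1, h2⟩; exact ⟨by omega, h2⟩
        · rw [hstep, if_neg hc, pvDfa_dead]
          simp only [List.all_cons]
          constructor
          · intro h; exact absurd h (by norm_num)
          · rintro ⟨-, h2⟩
            rw [Bool.and_eq_true] at h2
            exact absurd h2.1 hc

-- ===== VERDICT (by name: the statement is the Claim_ definition above) =====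
theorem is_base202_spec : Claim_equal_is_base202 := by
  intro string _
  unfold Spec_is_base202
  show is_base202 string = is_base202_alt string
  simp only [is_base202, is_base202_alt, bne]
  have hA : (PySem.Str.slice (PySem.Str.upper string) none (some 2) == "0C")
      = PySem.Chars.startswith (PySem.Str.upper string).toList "0C".toList := by
    rw [← pv_sw, PySem.Str.startswith_eq]
  simp only [hA, pvLoopA_eq_all, PySem.Str.len_eq]
  generalize (PySem.Str.upper string).toList = l
  cases l with
  | nil => simp [PySem.Chars.startswith]
  | cons c0 rest0 =>
    cases rest0 with
    | nil =>
        have hsw : PySem.Chars.startswith [c0] "0C".toList = false := by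
          cases hb : PySem.Chars.startswith [c0] "0C".toList
          · rfl
          · have := ((PySem.Chars.startswith_iff [c0] "0C".toList).mp hb).length_le
            simp at this
        rw [hsw]
        simp only [List.foldl_cons, List.foldl_nil, Bool.not_false, Bool.true_or, if_true]
        by_cases h0 : c0 = '0'
        · subst h0; simp [pvDfaStep]
        · have hb0 : (c0 == '0') = false := by simpa using h0
          simp [pvDfaStep, hb0]
    | cons c1 rest =>
      have hsw : PySem.Chars.startswith (c0 :: c1 :: rest) "0C".toList =
          ((c0 == '0') && (c1 == 'C')) := by
        cases hb : PySem.Chars.startswith (c0 :: c1 :: rest) "0C".toList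
        · symm
          rw [Bool.and_eq_false_iff]
          by_contra hcon
          push Not at hcon
          obtain ⟨h0, h1⟩ := hcon
          rw [Ne, Bool.eq_false_iff, Ne, not_not, beq_iff_eq] at h0 h1
          have htrue : PySem.Chars.startswith (c0 :: c1 :: rest) "0C".toList = true :=
            (PySem.Chars.startswith_iff _ _).mpr (by subst h0; subst h1; exact ⟨rest, rfl⟩)
          rw [hb] at htrue
          exact Bool.false_ne_true htrue
        · symm
          obtain ⟨t, ht⟩ := (PySem.Chars.startswith_iff (c0 :: c1 :: rest) "0C".toList).mp hb
          have h0 : c0 = '0' := by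
            have := congrArg (fun xs => xs.head?) ht
            simpa using this.symm
          have h1 : c1 = 'C' := by
            have := congrArg (fun xs => xs.tail.head?) ht
            simpa using this.symm
          subst h0; subst h1; simp
      rw [hsw]
      by_cases h0 : c0 = '0'
      · by_cases h1 : c1 = 'C'
        · subst h0; subst h1
          have hstep2 : (('0' :: 'C' :: rest).foldl pvDfaStep 0) =
              rest.foldl pvDfaStep 2 := by
            simp [List.foldl_cons, pvDfaStep]
          have hmid := pvDfa_mid rest 0 (by omega)
          simp only [Nat.cast_zero, add_zero, Nat.sub_zero] at hmid
          rw [hstep2]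
          simp only [List.length_cons, List.all_cons,
            show ("0C2OMPIN".toList).contains '0' = true by decide,
            show ("0C2OMPIN".toList).contains 'C' = true by decide,
            Bool.true_and, beq_self_eq_true, Bool.not_true, Bool.false_or]
          by_cases hL : rest.length = 8
          · have hlen10 : ((((rest.length + 1 + 1 : Nat)) : Int) == 10) = true := by
              rw [beq_iff_eq]; omega
            rw [hlen10]
            simp only [Bool.not_true, Bool.false_eq_true, if_false]
            by_cases hall : rest.all (fun c => ("0C2OMPIN".toList).contains c) = true
            · have h10 : rest.foldl pvDfaStep 2 = 10 := hmid.mpr ⟨hL, hall⟩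
              rw [h10, hall]
              decide
            · have hne : rest.foldl pvDfaStep 2 ≠ 10 := fun h => hall (hmid.mp h).2
              have hallf : rest.all (fun c => ("0C2OMPIN".toList).contains c) = false :=
                Bool.eq_false_iff.mpr hall
              rw [hallf]
              symm
              rw [beq_eq_false_iff_ne]
              exact hne
          · have hne : rest.foldl pvDfaStep 2 ≠ 10 := fun h => hL (hmid.mp h).1
            have hlenne : ((((rest.length + 1 + 1 : Nat)) : Int) == 10) = false := by
              rw [beq_eq_false_iff_ne]
              intro h
              exact hL (by omega)
            rw [hlenne]
            simp only [Bool.not_false, if_true]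
            symm
            rw [beq_eq_false_iff_ne]
            exact hne
        · have hb1 : (c1 == 'C') = false := by simpa using h1
          have hdead : ((('0' : Char) :: c1 :: rest).foldl pvDfaStep 0) = -1 := by
            simp [List.foldl_cons, pvDfaStep, hb1, pvDfa_dead]
          subst h0
          simp [hb1, hdead]
      · have hb0 : (c0 == '0') = false := by simpa using h0
        have hdead : ((c0 :: c1 :: rest).foldl pvDfaStep 0) = -1 := by
          simp [List.foldl_cons, pvDfaStep, hb0, pvDfa_dead]
        simp [hb0, hdead]
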